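-- pv_equiv track=rewrite | github.com/alexandergrote/cts | src/preprocess/extraction/spm.py | get_item_counts
-- ===== SOURCE A (Python) =====
-- from collections import defaultdict
-- from typing import List, Optional, Union, Tuple, Dict
--
-- def get_item_counts(database: List[List[str]], classes: Union[List[int], List[None]]) -> Tuple[Dict[str, int], Dict[str, int], Dict[str, int]]:
--
--     freq_items = defaultdict(int)
--     freq_items_pos = defaultdict(int)
--     freq_items_neg = defaultdict(int)
--
--     assert len(database) == len(classes)
--
--     # Count support for each item in the projected database
--     for sequence, class_value in zip(database, classes):
--
--         used = set()
--
--         for item in sequence: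
--
--             if item in used:
--                 continue
--
--             freq_items[item] += 1
--
--             if class_value == 0:
--                 freq_items_neg[item] += 1
--
--             elif class_value == 1:
--                 freq_items_pos[item] += 1
--
--             used.add(item)
--
--     return freq_items, freq_items_neg, freq_items_pos
-- ===== SOURCE B (Python) =====
-- from collections import Counter
--
--
-- def get_item_counts(database, classes):
--     assert len(database) == len(classes)
--
--     # Dedup each sequence up front (first occurrences, in order), then build the
--     # three counts as three independent Counter passes over the flattened items.
--     rows = [(list(dict.fromkeys(sequence)), class_value)
--             for sequence, class_value in zip(database, classes)]
--
--     freq_items = Counter(item for unique, _ in rows for item in unique)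
--     freq_items_neg = Counter(item for unique, c in rows if c == 0 for item in unique)
--     freq_items_pos = Counter(item for unique, c in rows if c == 1 for item in unique)
--
--     return freq_items, freq_items_neg, freq_items_pos
-- ===== Notes on version B (the rewrite author's own statement) =====
-- stated objective: simpler
-- what changed: A's single interleaved loop with a used-set-and-continue dedup and branching increments of three defaultdicts is replaced by an up-front ordered dedup of each sequence (dict.fromkeys) followed by three independent Counter passes over flattened item generators.
import Mathlib
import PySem

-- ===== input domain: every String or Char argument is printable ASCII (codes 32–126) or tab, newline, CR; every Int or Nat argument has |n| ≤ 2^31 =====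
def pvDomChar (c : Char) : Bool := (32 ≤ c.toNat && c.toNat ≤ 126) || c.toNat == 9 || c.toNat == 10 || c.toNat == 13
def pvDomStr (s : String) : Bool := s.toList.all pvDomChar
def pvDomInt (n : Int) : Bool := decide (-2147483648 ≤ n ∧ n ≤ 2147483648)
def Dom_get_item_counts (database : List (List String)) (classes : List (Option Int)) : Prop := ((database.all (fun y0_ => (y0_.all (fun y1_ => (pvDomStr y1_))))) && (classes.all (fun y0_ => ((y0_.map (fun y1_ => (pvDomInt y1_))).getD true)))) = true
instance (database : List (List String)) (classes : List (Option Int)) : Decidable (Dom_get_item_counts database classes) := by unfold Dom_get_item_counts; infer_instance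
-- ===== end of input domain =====

-- B replaces A's interleaved used-set-and-continue loop by an up-front ordered dedup of each
-- sequence followed by three independent Counter passes (simpler decomposition, same cost).

-- ===== PORT A =====
-- inner loop body: one item of a sequence, threading ((freq, neg, pos), used)
def pvStepA (c : Option Int)
    (acc : (PySem.Dict String Int × PySem.Dict String Int × PySem.Dict String Int) × PySem.Set String)
    (item : String) :
    (PySem.Dict String Int × PySem.Dict String Int × PySem.Dict String Int) × PySem.Set String :=
  if PySem.Set.contains acc.2 item then acc
  else
    let f := acc.1.1.insert item (acc.1.1.getD item 0 + 1)
    let fn := if c == some 0 then acc.1.2.1.insert item (acc.1.2.1.getD item 0 + 1) else acc.1.2.1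
    let fp := if c == some 0 then acc.1.2.2
              else if c == some 1 then acc.1.2.2.insert item (acc.1.2.2.getD item 0 + 1)
              else acc.1.2.2
    ((f, fn, fp), PySem.Set.add acc.2 item)

def get_item_counts (database : List (List String)) (classes : List (Option Int)) : (List (String × Int)) × (List (String × Int)) × (List (String × Int)) :=
  let st := (database.zip classes).foldl
    (fun st sc => (sc.1.foldl (pvStepA sc.2) (st, PySem.Set.empty)).1)
    ((PySem.Dict.empty, PySem.Dict.empty, PySem.Dict.empty) :
      PySem.Dict String Int × PySem.Dict String Int × PySem.Dict String Int)
  (st.1.items, st.2.1.items, st.2.2.items)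

-- ===== PORT B =====
def get_item_counts_alt (database : List (List String)) (classes : List (Option Int)) : (List (String × Int)) × (List (String × Int)) × (List (String × Int)) :=
  let rows := (database.zip classes).map (fun sc => (PySem.List.dedup sc.1, sc.2))
  let freq_items := PySem.Dict.counter (rows.flatMap (·.1))
  let freq_items_neg := PySem.Dict.counter (((rows.filter (fun r => r.2 == some 0)).flatMap (·.1)))
  let freq_items_pos := PySem.Dict.counter (((rows.filter (fun r => r.2 == some 1)).flatMap (·.1)))
  (freq_items.items, freq_items_neg.items, freq_items_pos.items)

-- ===== PRECONDITION & SPEC =====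
-- A asserts len(database) == len(classes); on unequal lengths it raises AssertionError.
def Pre_get_item_counts (database : List (List String)) (classes : List (Option Int)) : Prop :=
  database.length = classes.length
instance (database : List (List String)) (classes : List (Option Int)) : Decidable (Pre_get_item_counts database classes) := by unfold Pre_get_item_counts; infer_instance
def pvWitness_get_item_counts : List (List String) × List (Option Int) := ([["a", "b", "a"], ["b"]], [some 0, some 1])

def Spec_get_item_counts (database : List (List String)) (classes : List (Option Int)) (out : (List (String × Int)) × (List (String × Int)) × (List (String × Int))) : Prop := out = get_item_counts_alt database classes
instance (database : List (List String)) (classes : List (Option Int)) (out : (List (String × Int)) × (List (String × Int)) × (List (String × Int))) : Decidable (Spec_get_item_counts database classes out) := by unfold Spec_get_item_counts; infer_instance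

-- ===== CLAIM (what is proved, stated in full; the proofs are below) =====
def Claim_equal_get_item_counts : Prop := ∀ (database : List (List String)) (classes : List (Option Int)), Dom_get_item_counts database classes → Pre_get_item_counts database classes → Spec_get_item_counts database classes (get_item_counts database classes)

-- ===== LEMMAS AND PROOFS =====

-- dedup of a sequence relative to an already-used set (what A's inner loop visits)
def pvDD (used : PySem.Set String) : List String → List String
  | [] => []
  | x :: xs => if PySem.Set.contains used x then pvDD used xs
               else x :: pvDD (PySem.Set.add used x) xs

-- single joint update on the triple, for one distinct item
def pvBumpJ (c : Option Int)
    (st : PySem.Dict String Int × PySem.Dict String Int × PySem.Dict String Int)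
    (item : String) :
    PySem.Dict String Int × PySem.Dict String Int × PySem.Dict String Int :=
  (st.1.insert item (st.1.getD item 0 + 1),
   (if c == some 0 then st.2.1.insert item (st.2.1.getD item 0 + 1) else st.2.1),
   (if c == some 0 then st.2.2
    else if c == some 1 then st.2.2.insert item (st.2.2.getD item 0 + 1)
    else st.2.2))

def pvBump (d : PySem.Dict String Int) (x : String) : PySem.Dict String Int :=
  d.insert x (d.getD x 0 + 1)

theorem pvInner (c : Option Int) (seq : List String)
    (st : PySem.Dict String Int × PySem.Dict String Int × PySem.Dict String Int)
    (used : PySem.Set String) :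
    (seq.foldl (pvStepA c) (st, used)).1 = (pvDD used seq).foldl (pvBumpJ c) st := by
  induction seq generalizing st used with
  | nil => rfl
  | cons x xs ih =>
    simp only [List.foldl_cons, pvStepA, pvDD]
    by_cases h : x ∈ used
    · simp [PySem.Set.contains, h, ih]
    · simp [PySem.Set.contains, h, ih, pvBumpJ]

theorem pvFoldlAdd (xs : List String) (s : PySem.Set String) :
    xs.foldl PySem.Set.add s = s ++ pvDD s xs := by
  induction xs generalizing s with
  | nil => simp [pvDD]
  | cons x xs ih =>
    simp only [List.foldl_cons, pvDD]
    by_cases h : x ∈ s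
    · simp [PySem.Set.add, PySem.Set.contains, h, ih]
    · have hadd : PySem.Set.add s x = s ++ [x] := by
        simp [PySem.Set.add, PySem.Set.contains, h]
      rw [ih, hadd]
      simp [PySem.Set.contains, h]

theorem pvDD_empty (xs : List String) : pvDD PySem.Set.empty xs = PySem.List.dedup xs := by
  have h := pvFoldlAdd xs PySem.Set.empty
  simp only [PySem.Set.empty, List.nil_append] at h
  simp [PySem.List.dedup_eq_ofList, PySem.Set.ofList_eq_foldl, ← h, PySem.Set.empty]

-- component 1: the joint fold's first dict is a bump fold over the items
theorem pvJoint1 (c : Option Int) (seq : List String)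
    (st : PySem.Dict String Int × PySem.Dict String Int × PySem.Dict String Int) :
    (seq.foldl (pvBumpJ c) st).1 = seq.foldl pvBump st.1 := by
  induction seq generalizing st with
  | nil => rfl
  | cons x xs ih => simp [pvBumpJ, pvBump, ih]

theorem pvJoint2 (c : Option Int) (seq : List String)
    (st : PySem.Dict String Int × PySem.Dict String Int × PySem.Dict String Int) :
    (seq.foldl (pvBumpJ c) st).2.1 =
      if c == some 0 then seq.foldl pvBump st.2.1 else st.2.1 := by
  induction seq generalizing st with
  | nil => simp
  | cons x xs ih =>
    by_cases h : c = some 0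
    · subst h; simp [pvBumpJ, pvBump, ih]
    · simp [pvBumpJ, ih, h]

theorem pvJoint3 (c : Option Int) (seq : List String)
    (st : PySem.Dict String Int × PySem.Dict String Int × PySem.Dict String Int) :
    (seq.foldl (pvBumpJ c) st).2.2 =
      if c == some 1 then seq.foldl pvBump st.2.2 else st.2.2 := by
  induction seq generalizing st with
  | nil => simp
  | cons x xs ih =>
    by_cases h1 : c = some 1
    · subst h1; simp [pvBumpJ, pvBump, ih]
    · by_cases h0 : c = some 0
      · subst h0; simp [pvBumpJ, ih]
      · simp [pvBumpJ, ih, h0, h1]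

-- the outer fold, component-wise, over rows of (deduped sequence, class)
theorem pvOuter1 (rows : List (List String × Option Int))
    (st : PySem.Dict String Int × PySem.Dict String Int × PySem.Dict String Int) :
    (rows.foldl (fun st r => r.1.foldl (pvBumpJ r.2) st) st).1 =
      (rows.flatMap (·.1)).foldl pvBump st.1 := by
  induction rows generalizing st with
  | nil => rfl
  | cons r rs ih => simp [ih, pvJoint1, List.foldl_append]

theorem pvOuter2 (rows : List (List String × Option Int))
    (st : PySem.Dict String Int × PySem.Dict String Int × PySem.Dict String Int) :
    (rows.foldl (fun st r => r.1.foldl (pvBumpJ r.2) st) st).2.1 =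
      ((rows.filter (fun r => r.2 == some 0)).flatMap (·.1)).foldl pvBump st.2.1 := by
  induction rows generalizing st with
  | nil => rfl
  | cons r rs ih =>
    by_cases h : r.2 = some 0
    · simp [ih, pvJoint2, h, List.foldl_append]
    · simp [ih, pvJoint2, h]

theorem pvOuter3 (rows : List (List String × Option Int))
    (st : PySem.Dict String Int × PySem.Dict String Int × PySem.Dict String Int) :
    (rows.foldl (fun st r => r.1.foldl (pvBumpJ r.2) st) st).2.2 =
      ((rows.filter (fun r => r.2 == some 1)).flatMap (·.1)).foldl pvBump st.2.2 := by
  induction rows generalizing st with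
  | nil => rfl
  | cons r rs ih =>
    by_cases h : r.2 = some 1
    · simp [ih, pvJoint3, h, List.foldl_append]
    · simp [ih, pvJoint3, h]

theorem pvBump_counter (xs : List String) :
    xs.foldl pvBump PySem.Dict.empty = PySem.Dict.counter xs :=
  PySem.Dict.foldl_insert_getD_add_one_eq_counter xs

-- ===== VERDICT (by name: the statement is the Claim_ definition above) =====
theorem get_item_counts_spec : Claim_equal_get_item_counts := by
  intro database classes _ _
  unfold Spec_get_item_counts get_item_counts get_item_counts_alt
  have hA : ∀ st, (database.zip classes).foldl
      (fun st (sc : List String × Option Int) => (sc.1.foldl (pvStepA sc.2) (st, PySem.Set.empty)).1) st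
      = ((database.zip classes).map (fun sc => (PySem.List.dedup sc.1, sc.2))).foldl
          (fun st r => r.1.foldl (pvBumpJ r.2) st) st := by
    intro st
    rw [List.foldl_map]
    apply PySem.List.foldl_congr_mem
    intro st sc _
    rw [pvInner, pvDD_empty]
  rw [hA]
  refine Prod.ext ?_ (Prod.ext ?_ ?_) <;>
    simp [pvOuter1, pvOuter2, pvOuter3, pvBump_counter]
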